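-- pv_equiv track=rewrite | github.com/MathThibaud/Advent-of-Code-2022 | Day10/day10.py | sequences
-- ===== SOURCE A (Python) =====
-- def sequences(donnees):
--     c = 1
--     x = 1
--     liste = [(0,0), (c, x)]
--     for ligne in donnees:
--         if ligne[0] == 'noop':
--             c = c+1
--             new = (c, x)
--             liste.append(new)
--         else:
--             c += 1
--             new = (c, x)
--             liste.append(new)
--             c += 1
--             x += int(ligne[1])
--             new = (c, x)
--             liste.append(new)
--     return liste
-- ===== SOURCE B (Python) =====
-- def sequences(donnees):
--     # flat list of per-cycle register increments: noop -> [0], addx V -> [0, V]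
--     incs = [inc
--             for ligne in donnees
--             for inc in ([0] if ligne[0] == 'noop' else [0, int(ligne[1])])]
--     # register value stream: prefix sums seeded at 1
--     total = 1
--     xs = [1]
--     for d in incs:
--         total += d
--         xs.append(total)
--     # cycle numbers are just 1,2,3,...; prepend the (0,0) seed
--     return [(0, 0)] + list(enumerate(xs, 1))
-- ===== Notes on version B (the rewrite author's own statement) =====
-- stated objective: alternative
-- what changed: Replaces the interleaved mutate-and-append loop over (cycle, register) state with a flat per-cycle increment list, a prefix-sum pass, and enumerate to attach cycle numbers.
import Mathlib
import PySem

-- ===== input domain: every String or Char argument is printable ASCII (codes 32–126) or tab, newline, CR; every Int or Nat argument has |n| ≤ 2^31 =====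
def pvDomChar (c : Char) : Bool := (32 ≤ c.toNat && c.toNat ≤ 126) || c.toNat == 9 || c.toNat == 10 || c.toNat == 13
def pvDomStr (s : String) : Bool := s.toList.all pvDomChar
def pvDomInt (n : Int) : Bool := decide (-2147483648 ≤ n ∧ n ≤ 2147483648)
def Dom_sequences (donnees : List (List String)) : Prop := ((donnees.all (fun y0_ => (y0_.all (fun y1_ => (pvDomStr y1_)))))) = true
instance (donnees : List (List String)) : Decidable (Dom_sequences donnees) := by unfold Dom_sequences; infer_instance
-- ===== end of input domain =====

-- B replaces A's interleaved mutate-and-append loop with a flat increment list,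
-- a prefix-sum pass and enumerate (alternative decomposition, same cost).


-- ===== PORT A =====
-- literal port of A's loop: state (c, x, liste); ligne[0]/int(ligne[1]) via PySem
-- (the .getD 0 is only reached where Python raises, which Pre_sequences excludes)
def sequences (donnees : List (List String)) : List (Int × Int) :=
  let st := donnees.foldl
    (fun (st : Int × Int × List (Int × Int)) ligne =>
      let c := st.1; let x := st.2.1; let liste := st.2.2
      if PySem.List.pyGet? ligne 0 = some "noop" then
        (c + 1, x, liste ++ [(c + 1, x)])
      else
        let v := ((PySem.List.pyGet? ligne 1).bind PySem.Int.ofStr?).getD 0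
        (c + 2, x + v, liste ++ [(c + 1, x), (c + 2, x + v)]))
    (1, 1, [(0, 0), (1, 1)])
  st.2.2

-- ===== PORT B =====
-- per-instruction increment list: noop -> [0], addx V -> [0, V]
def seqInc (ligne : List String) : List Int :=
  if PySem.List.pyGet? ligne 0 = some "noop" then [0]
  else [0, ((PySem.List.pyGet? ligne 1).bind PySem.Int.ofStr?).getD 0]

def sequences_alt (donnees : List (List String)) : List (Int × Int) :=
  let incs := donnees.flatMap seqInc
  let st := incs.foldl (fun (st : Int × List Int) d => (st.1 + d, st.2 ++ [st.1 + d])) (1, [1])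
  [(0, 0)] ++ PySem.List.enumerate st.2 1

-- ===== PRECONDITION & SPEC =====
-- Pre_ excludes exactly the inputs where Python A raises: an empty instruction
-- (IndexError) or a non-noop line without a parsable integer in position 1
-- (IndexError/ValueError).
def Pre_sequences (donnees : List (List String)) : Prop :=
  ∀ ligne ∈ donnees,
    PySem.List.pyGet? ligne 0 = some "noop" ∨
    ((PySem.List.pyGet? ligne 1).bind PySem.Int.ofStr?).isSome = true
instance (donnees : List (List String)) : Decidable (Pre_sequences donnees) := by
  unfold Pre_sequences; infer_instance
def pvWitness_sequences : List (List String) := [["addx", "-5"], ["noop"], ["addx", "12"]]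

def Spec_sequences (donnees : List (List String)) (out : List (Int × Int)) : Prop := out = sequences_alt donnees
instance (donnees : List (List String)) (out : List (Int × Int)) : Decidable (Spec_sequences donnees out) := by unfold Spec_sequences; infer_instance

-- ===== CLAIM (what is proved, stated in full; the proofs are below) =====
def Claim_equal_sequences : Prop := ∀ (donnees : List (List String)), Dom_sequences donnees → Pre_sequences donnees → Spec_sequences donnees (sequences donnees)

-- ===== LEMMAS AND PROOFS =====

/-- partial sums of `incs` starting from running total `t` (excluding the seed). -/
def seqSums (t : Int) : List Int → List Int
  | [] => []
  | d :: ds => (t + d) :: seqSums (t + d) ds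

theorem enum_seqSums_noop (x s : Int) (l : List Int) :
    PySem.List.enumerate (seqSums x (0 :: l)) s
      = (s, x) :: PySem.List.enumerate (seqSums x l) (s + 1) := by
  simp [seqSums, PySem.List.enumerate_cons]

theorem enum_seqSums_addx (x v s : Int) (l : List Int) :
    PySem.List.enumerate (seqSums x (0 :: v :: l)) s
      = (s, x) :: (s + 1, x + v) :: PySem.List.enumerate (seqSums (x + v) l) (s + 2) := by
  simp [seqSums, PySem.List.enumerate_cons, add_assoc]

theorem scan_foldl (incs : List Int) (t : Int) (xs : List Int) :
    (incs.foldl (fun (st : Int × List Int) d => (st.1 + d, st.2 ++ [st.1 + d])) (t, xs)).2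
      = xs ++ seqSums t incs := by
  induction incs generalizing t xs with
  | nil => simp [seqSums]
  | cons d ds ih => simp [List.foldl, seqSums, ih]

theorem sequences_foldl (donnees : List (List String)) (c x : Int) (acc : List (Int × Int)) :
    (donnees.foldl
      (fun (st : Int × Int × List (Int × Int)) ligne =>
        let c := st.1; let x := st.2.1; let liste := st.2.2
        if PySem.List.pyGet? ligne 0 = some "noop" then
          (c + 1, x, liste ++ [(c + 1, x)])
        else
          let v := ((PySem.List.pyGet? ligne 1).bind PySem.Int.ofStr?).getD 0
          (c + 2, x + v, liste ++ [(c + 1, x), (c + 2, x + v)]))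
      (c, x, acc)).2.2
      = acc ++ PySem.List.enumerate (seqSums x (donnees.flatMap seqInc)) (c + 1) := by
  induction donnees generalizing c x acc with
  | nil => simp [PySem.List.enumerate_nil, seqSums]
  | cons ligne rest ih =>
    by_cases h : PySem.List.pyGet? ligne 0 = some "noop"
    · simp only [List.foldl_cons, List.flatMap_cons, seqInc, h, if_true, List.singleton_append]
      rw [ih, enum_seqSums_noop]
      simp [add_assoc]
    · simp only [List.foldl_cons, List.flatMap_cons, seqInc, h, if_false, List.cons_append]
      rw [ih, enum_seqSums_addx]
      simp [add_assoc]

-- ===== VERDICT (by name: the statement is the Claim_ definition above) =====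
theorem sequences_spec : Claim_equal_sequences := by
  intro donnees _ _
  unfold Spec_sequences sequences sequences_alt
  rw [sequences_foldl]
  simp [scan_foldl, PySem.List.enumerate_cons]
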